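-- pv_equiv track=rewrite | github.com/metalveor/TMS-course | PyCharm_project/extra homework/edit_hm.py | task_7_preparation
-- ===== SOURCE A (Python) =====
-- def task_7_preparation(file):  # Вывести на экран сколько во всех файлах среди спецсимволов знаков препинания
--     start_set = {'!', '-', '(', ')', ',', '.', ':', ';', '?'}
--     symbol_list = []
--     punctuation_list = []
--     other_symbol_list = []
--     for i in file:
--         if i.isalpha():
--             continue
--         elif i.isdigit():
--             continue
--         else:
--             symbol_list.append(i)
--     for i in symbol_list:
--         if i in start_set:
--             punctuation_list.append(i)
--         else:
--             other_symbol_list.append(i)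
--
--     return len(punctuation_list), len(other_symbol_list)
-- ===== SOURCE B (Python) =====
-- def task_7_preparation(file):
--     start_set = {'!', '-', '(', ')', ',', '.', ':', ';', '?'}
--     counts = {}
--     for ch in file:
--         counts[ch] = counts.get(ch, 0) + 1
--     punctuation = sum(counts.get(c, 0) for c in start_set)
--     other = sum(n for ch, n in counts.items()
--                 if not ch.isalpha() and not ch.isdigit() and ch not in start_set)
--     return punctuation, other
-- ===== Notes on version B (the rewrite author's own statement) =====
-- stated objective: alternative
-- what changed: B builds a character frequency table in one pass and computes both totals by summing counts over the punctuation set and over the table's distinct keys, instead of A's two passes that materialise three intermediate character lists and take their lengths.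
import Mathlib
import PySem

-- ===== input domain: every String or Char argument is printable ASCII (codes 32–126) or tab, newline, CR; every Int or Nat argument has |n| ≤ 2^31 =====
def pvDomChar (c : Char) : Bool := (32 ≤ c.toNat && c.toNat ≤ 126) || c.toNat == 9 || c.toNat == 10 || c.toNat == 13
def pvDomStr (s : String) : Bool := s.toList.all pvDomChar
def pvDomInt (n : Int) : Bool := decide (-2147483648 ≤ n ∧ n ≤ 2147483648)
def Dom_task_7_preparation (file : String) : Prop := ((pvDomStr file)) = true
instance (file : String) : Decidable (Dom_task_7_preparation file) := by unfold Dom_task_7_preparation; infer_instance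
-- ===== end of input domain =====

-- B replaces A's list-building passes by a frequency table summed over the punctuation set and the distinct keys (alternative decomposition, same cost).

-- ===== PORT A =====
def pvStartList : List Char := ['!', '-', '(', ')', ',', '.', ':', ';', '?']

def task_7_preparation (file : String) : Int × Int :=
  let startSet : PySem.Set Char := PySem.Set.ofList pvStartList
  let symbolList : List Char := file.toList.foldl (fun acc i =>
    if PySem.Chars.isalpha i then acc
    else if PySem.Chars.isdigit i then acc
    else acc ++ [i]) []
  let pair : List Char × List Char := symbolList.foldl (fun st i =>
    if startSet.contains i then (st.1 ++ [i], st.2) else (st.1, st.2 ++ [i])) ([], [])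
  ((pair.1.length : Int), (pair.2.length : Int))

-- ===== PORT B =====
def task_7_preparation_alt (file : String) : Int × Int :=
  let startSet : PySem.Set Char := PySem.Set.ofList pvStartList
  let counts : PySem.Dict Char Int :=
    file.toList.foldl (fun d ch => d.insert ch (d.getD ch 0 + 1)) PySem.Dict.empty
  let punctuation : Int := (startSet.map (fun c => counts.getD c 0)).sum
  let other : Int := ((counts.items.filter (fun kv =>
      !PySem.Chars.isalpha kv.1 && !PySem.Chars.isdigit kv.1 && !startSet.contains kv.1)).map (·.2)).sum
  (punctuation, other)

-- ===== PRECONDITION & SPEC =====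
def Spec_task_7_preparation (file : String) (out : Int × Int) : Prop := out = task_7_preparation_alt file
instance (file : String) (out : Int × Int) : Decidable (Spec_task_7_preparation file out) := by unfold Spec_task_7_preparation; infer_instance

-- ===== CLAIM (what is proved, stated in full; the proofs are below) =====
def Claim_equal_task_7_preparation : Prop := ∀ (file : String), Dom_task_7_preparation file → Spec_task_7_preparation file (task_7_preparation file)

-- ===== LEMMAS AND PROOFS =====

-- sum of an equality-indicator over ks counts the occurrences of x in ks
theorem pv_sum_indicator (x : Char) (ks : List Char) :
    (ks.map (fun k => if x = k then 1 else 0)).sum = ks.count x := by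
  induction ks with
  | nil => simp
  | cons k t ih =>
    simp only [List.map_cons, List.sum_cons, List.count_cons, ih]
    by_cases h : x = k
    · subst h; simp [Nat.add_comm]
    · simp [h, Ne.symm h]

-- summing l.count over a duplicate-free key list covering the p-elements of l gives the filtered length
theorem pv_key (p : Char → Bool) (ks l : List Char) (hnd : ks.Nodup)
    (hcov : ∀ k, k ∈ l → p k = true → k ∈ ks) (hks : ∀ k ∈ ks, p k = true) :
    (ks.map (fun k => l.count k)).sum = (l.filter p).length := by
  induction l with
  | nil => simp
  | cons x t ih =>
    have hsum : (ks.map (fun k => (x :: t).count k)).sum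
        = (ks.map (fun k => t.count k)).sum + (ks.map (fun k => if x = k then 1 else 0)).sum := by
      rw [← List.sum_map_add]
      refine congrArg List.sum (List.map_congr_left fun k _ => ?_)
      by_cases h : x = k
      · simp [List.count_cons, h]
      · simp [List.count_cons, h, Ne.symm h]
    rw [hsum, pv_sum_indicator,
        ih (fun k hk hp => hcov k (List.mem_cons_of_mem _ hk) hp)]
    by_cases hp : p x = true
    · have hx : x ∈ ks := hcov x (List.mem_cons_self) hp
      rw [List.count_eq_one_of_mem hnd hx]
      simp [hp, Nat.add_comm]
    · have hx : x ∉ ks := fun h => hp (hks x h)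
      rw [List.count_eq_zero_of_not_mem hx]
      simp [List.filter_cons, hp]

-- the splitting loop of A is a pair of filters
theorem pv_split (q : Char → Bool) (l a b : List Char) :
    l.foldl (fun st i => if q i then (st.1 ++ [i], st.2) else (st.1, st.2 ++ [i])) (a, b)
      = (a ++ l.filter q, b ++ l.filter (fun i => !q i)) := by
  induction l generalizing a b with
  | nil => simp
  | cons x t ih =>
    by_cases h : q x = true
    · simp [List.foldl_cons, h, ih]
    · simp only [Bool.not_eq_true] at h
      simp [List.foldl_cons, h, ih, List.filter_cons]

-- no punctuation character is a letter or a digit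
theorem pv_start_not_alnum : ∀ c ∈ pvStartList,
    PySem.Chars.isalpha c = false ∧ PySem.Chars.isdigit c = false := by
  intro c hc
  simp only [pvStartList, List.mem_cons, List.not_mem_nil, or_false] at hc
  rcases hc with h|h|h|h|h|h|h|h|h <;> subst h <;>
    exact ⟨by simp [PySem.Chars.isalpha, PySem.Chars.isupper, PySem.Chars.islower], by decide⟩

-- ===== VERDICT (by name: the statement is the Claim_ definition above) =====
theorem task_7_preparation_spec : Claim_equal_task_7_preparation := by
  intro file _
  unfold Spec_task_7_preparation task_7_preparation task_7_preparation_alt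
  simp only []
  set l := file.toList with hl
  set S : List Char := PySem.Set.ofList pvStartList with hS
  -- predicates
  set pNA : Char → Bool := fun i => !PySem.Chars.isalpha i && !PySem.Chars.isdigit i with hpNA
  set pMem : Char → Bool := fun i => PySem.Set.contains S i with hpMem
  set pOther : Char → Bool := fun i =>
    !PySem.Chars.isalpha i && !PySem.Chars.isdigit i && !PySem.Set.contains S i with hpOther
  -- characters of the start set are neither letters nor digits
  have hstart : ∀ c : Char, PySem.Set.contains S c = true →
      PySem.Chars.isalpha c = false ∧ PySem.Chars.isdigit c = false := by
    intro c hc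
    exact pv_start_not_alnum c ((PySem.Set.mem_ofList _ _).1 (List.contains_iff_mem.1 hc))
  -- A's first loop is a filter
  have hsym : l.foldl (fun acc i =>
      if PySem.Chars.isalpha i then acc
      else if PySem.Chars.isdigit i then acc
      else acc ++ [i]) [] = l.filter pNA := by
    have hf : (fun (acc : List Char) i =>
        if PySem.Chars.isalpha i then acc
        else if PySem.Chars.isdigit i then acc
        else acc ++ [i])
        = (fun acc i => if pNA i then acc ++ [i] else acc) := by
      funext acc i
      cases ha : PySem.Chars.isalpha i <;> cases hd : PySem.Chars.isdigit i <;>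
        simp [hpNA, ha, hd]
    rw [hf, PySem.List.foldl_append_if_eq_filter]
    simp
  -- A's second loop splits into two filters
  rw [hsym]
  rw [pv_split]
  simp only [List.nil_append]
  -- B's counter
  rw [PySem.Dict.foldl_insert_getD_add_one_eq_counter, PySem.Dict.items_counter]
  -- B's punctuation component
  have hpunct : (List.map (fun c => (PySem.Dict.counter l).getD c 0) S).sum
      = (((l.filter pNA).filter pMem).length : Int) := by
    have h1 : ((l.filter pNA).filter pMem) = l.filter pMem := by
      rw [List.filter_filter]
      refine List.filter_congr fun x _ => ?_
      cases hm : pMem x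
      · simp
      · have := hstart x hm
        simp [hpNA, this.1, this.2]
    rw [h1]
    have h2 : (List.map (fun c => (PySem.Dict.counter l).getD c 0) S)
        = List.map (fun c => ((l.count c : Nat) : Int)) S := by
      refine List.map_congr_left fun c _ => ?_
      rw [PySem.Dict.getD_counter]
    rw [h2, show (List.map (fun c => ((l.count c : Nat) : Int)) S)
        = List.map (Nat.cast : Nat → Int) (List.map (fun c => l.count c) S) by
      rw [List.map_map]; rfl]
    rw [← Nat.cast_list_sum]
    rw [pv_key pMem S l (PySem.Set.nodup_ofList _)
      (fun k _ hp => List.contains_iff_mem.1 hp)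
      (fun k hk => List.contains_iff_mem.2 hk)]
  -- B's other component
  have hother : ((List.filter (fun kv =>
        !PySem.Chars.isalpha kv.1 && !PySem.Chars.isdigit kv.1 && !PySem.Set.contains S kv.1)
        (List.map (fun k => (k, (l.count k : Int))) (PySem.Set.ofList l))).map (·.2)).sum
      = (((l.filter pNA).filter (fun i => !pMem i)).length : Int) := by
    have h1 : ((l.filter pNA).filter (fun i => !pMem i)) = l.filter pOther := by
      rw [List.filter_filter]
      refine List.filter_congr fun x _ => ?_
      simp [hpNA, hpMem, hpOther, Bool.and_comm, Bool.and_assoc]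
    rw [h1, List.filter_map, List.map_map]
    have h2 : ((fun kv : Char × Int => !PySem.Chars.isalpha kv.1 &&
        !PySem.Chars.isdigit kv.1 && !PySem.Set.contains S kv.1) ∘
        (fun k => (k, (l.count k : Int)))) = pOther := by
      funext k; simp [hpOther]
    rw [h2]
    have h3 : ((·.2) ∘ (fun k : Char => (k, (l.count k : Int))))
        = (Nat.cast : Nat → Int) ∘ (fun k => l.count k) := rfl
    rw [h3, ← List.map_map, ← Nat.cast_list_sum]
    rw [pv_key pOther (List.filter pOther (PySem.Set.ofList l)) l
      ((PySem.Set.nodup_ofList _).filter _)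
      (fun k hk hp => List.mem_filter.2 ⟨(PySem.Set.mem_ofList _ _).2 hk, hp⟩)
      (fun k hk => (List.mem_filter.1 hk).2)]
  rw [hpunct, hother]
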